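-- pv_equiv track=rewrite | github.com/PavelBashtrykov/EpiAlleles | utils/fasta.py | _find_motif_coordates
-- ===== SOURCE A (Python) =====
-- def _find_motif_coordates(sequence: str, motif: str = "CG") -> list:
--     """Finds motif (default: CG) coordinates in a sequence.
--     """
--     coordinates = []
--     seq = sequence.upper()
--     length = len(seq)
--     motif_len = len(motif)
--     index = 0
--     while index < length:
--         index = seq.find(motif, index)
--         if index == -1:
--             break
--         coordinates.append(index)
--         index += motif_len
--     return coordinates
-- ===== SOURCE B (Python) =====
-- def _find_motif_coordates(sequence: str, motif: str = "CG") -> list: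
--     """Finds motif (default: CG) coordinates in a sequence.
--
--     Single left-to-right window scan: compare each slice against the motif,
--     skipping windows that would overlap the previous match.
--     """
--     seq = sequence.upper()
--     m = len(motif)
--     coordinates = []
--     nxt = 0
--     for i in range(len(seq) - m + 1):
--         if nxt <= i and seq[i:i + m] == motif:
--             coordinates.append(i)
--             nxt = i + m
--     return coordinates
-- ===== Notes on version B (the rewrite author's own statement) =====
-- stated objective: alternative
-- what changed: B replaces A's find()-and-jump while loop by a single for-loop over every window position that compares the slice seq[i:i+m] against the motif and skips overlapping windows with a next-allowed-index threshold; Pre_ excludes the empty motif, on which A's find('') never advances the index so the loop fails to terminate whenever its guard is entered, and on the one cited empty-motif input where it is not entered A's [] and B's [0] are both defensible conventions for zero-width matches.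
-- outside the precondition, e.g. on _find_motif_coordates('', ''): A returns [], B returns [0]
import Mathlib
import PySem

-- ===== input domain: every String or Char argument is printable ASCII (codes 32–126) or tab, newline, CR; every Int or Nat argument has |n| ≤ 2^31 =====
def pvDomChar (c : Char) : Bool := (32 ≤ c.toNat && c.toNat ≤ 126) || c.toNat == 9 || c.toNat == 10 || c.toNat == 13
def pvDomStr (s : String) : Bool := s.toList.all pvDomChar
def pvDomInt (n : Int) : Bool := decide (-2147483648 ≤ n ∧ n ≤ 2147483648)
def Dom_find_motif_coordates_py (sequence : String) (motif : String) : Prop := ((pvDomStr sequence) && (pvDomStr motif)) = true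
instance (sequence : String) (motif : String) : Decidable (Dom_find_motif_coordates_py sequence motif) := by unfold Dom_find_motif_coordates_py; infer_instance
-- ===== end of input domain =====

-- B replaces A's find()-and-jump while loop by a single window scan with an overlap
-- threshold (an alternative algorithm of the same cost); Pre_ excludes the empty motif,
-- on which A does not terminate whenever its loop guard is entered.


-- ===== PORT A =====
-- the 'while index < length' loop of A; fuel makes it total (within Pre_ the index
-- strictly increases each iteration, so fuel = length + 1 is never exhausted)
def pvLoopA (seq mo : List Char) (length mlen : Int) : Nat → Int → List Int → List Int
  | 0, _, coordinates => coordinates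
  | fuel + 1, index, coordinates =>
    if index < length then
      let index' := PySem.Chars.findFrom seq mo index none   -- seq.find(motif, index)
      if index' = -1 then coordinates
      else pvLoopA seq mo length mlen fuel (index' + mlen) (coordinates ++ [index'])
    else coordinates

def find_motif_coordates_py (sequence : String) (motif : String) : List Int :=
  let seq := PySem.Chars.upper sequence.toList
  let length : Int := PySem.Chars.len seq
  let mlen : Int := PySem.Chars.len motif.toList
  pvLoopA seq motif.toList length mlen (seq.length + 1) 0 []

-- ===== PORT B =====
-- loop body of B's for-loop: state is (coordinates, nxt)
def pvStepB (seq mo : List Char) (mlen : Int) (st : List Int × Int) (i : Int) : List Int × Int :=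
  if st.2 ≤ i ∧ PySem.List.slice seq (some i) (some (i + mlen)) = mo then
    (st.1 ++ [i], i + mlen)
  else st

def find_motif_coordates_py_alt (sequence : String) (motif : String) : List Int :=
  let seq := PySem.Chars.upper sequence.toList
  let mlen : Int := PySem.Chars.len motif.toList
  ((PySem.List.pyRange 0 ((seq.length : Int) - mlen + 1) 1).foldl
    (pvStepB seq motif.toList mlen) ([], 0)).1

-- ===== PRECONDITION & SPEC =====
-- Pre_ excludes the empty motif: there A's find('') never advances the index, so the loop
-- fails to terminate whenever its guard is entered; on the one remaining empty-motif input
-- (cited in claim.json) A's [] and B's [0] are both defensible conventions for zero-width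
-- matches.
def Pre_find_motif_coordates_py (sequence : String) (motif : String) : Prop := motif ≠ ""

instance (sequence : String) (motif : String) : Decidable (Pre_find_motif_coordates_py sequence motif) := by unfold Pre_find_motif_coordates_py; infer_instance

def pvWitness_find_motif_coordates_py : String × String := ("acgCGtcgA", "CG")

def Spec_find_motif_coordates_py (sequence : String) (motif : String) (out : List Int) : Prop := out = find_motif_coordates_py_alt sequence motif
instance (sequence : String) (motif : String) (out : List Int) : Decidable (Spec_find_motif_coordates_py sequence motif out) := by unfold Spec_find_motif_coordates_py; infer_instance

-- ===== CLAIM (what is proved, stated in full; the proofs are below) =====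
def Claim_equal_find_motif_coordates_py : Prop := ∀ (sequence : String) (motif : String), Dom_find_motif_coordates_py sequence motif → Pre_find_motif_coordates_py sequence motif → Spec_find_motif_coordates_py sequence motif (find_motif_coordates_py sequence motif)

-- ===== LEMMAS AND PROOFS =====

-- a prefix of a later drop is an infix of an earlier drop
lemma pv_prefix_drop_infix {s m : List Char} {i j : Nat} (hij : i ≤ j)
    (h : m <+: s.drop j) : m <:+: s.drop i := by
  have : s.drop j = (s.drop i).drop (j - i) := by
    rw [List.drop_drop]; congr 1; omega
  rw [this] at h
  exact h.isInfix.trans (List.drop_suffix _ _).isInfix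

-- B's slice test at a nonnegative position i is exactly "motif is a prefix of s.drop i"
lemma pv_slice_eq_iff (s m : List Char) (i : Nat) :
    PySem.List.slice s (some (i : Int)) (some ((i : Int) + (m.length : Int))) = m
      ↔ m <+: s.drop i := by
  rw [PySem.List.slice_natCast_add]
  constructor
  · intro h; rw [← h]; exact List.take_prefix _ _
  · intro h
    exact (List.prefix_iff_eq_take.mp h).symm

-- a range segment on which no window matches leaves B's state unchanged
lemma pv_nomatch_seg (s m : List Char) (a b : Int) (st : List Int × Int) (ha : 0 ≤ a)
    (h : ∀ j : Int, a ≤ j → j < b → ¬ m <+: s.drop j.toNat) :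
    (PySem.List.pyRange a b 1).foldl (pvStepB s m (m.length : Int)) st = st := by
  by_cases hab : b ≤ a
  · rw [PySem.List.pyRange_one_eq_nil hab]; rfl
  · push_neg at hab
    rw [PySem.List.pyRange_one_cons hab, List.foldl_cons]
    have hna : ¬ m <+: s.drop a.toNat := h a le_rfl hab
    have hstep : pvStepB s m (m.length : Int) st a = st := by
      unfold pvStepB
      rw [if_neg]
      rintro ⟨-, hsl⟩
      have : PySem.List.slice s (some ((a.toNat : Int))) (some ((a.toNat : Int) + (m.length : Int))) = m := by
        rwa [Int.toNat_of_nonneg ha]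
      exact hna ((pv_slice_eq_iff s m a.toNat).mp this)
    rw [hstep]
    exact pv_nomatch_seg s m (a + 1) b st (by omega) (fun j hj hjb => h j (by omega) hjb)
termination_by (b - a).toNat
decreasing_by omega

-- windows strictly below the threshold are skipped
lemma pv_skip_all (s m : List Char) (a b : Int) (acc : List Int) (k : Int) (hbk : b ≤ k) :
    (PySem.List.pyRange a b 1).foldl (pvStepB s m (m.length : Int)) (acc, k) = (acc, k) := by
  by_cases hab : b ≤ a
  · rw [PySem.List.pyRange_one_eq_nil hab]; rfl
  · push_neg at hab
    rw [PySem.List.pyRange_one_cons hab, List.foldl_cons]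
    have hstep : pvStepB s m (m.length : Int) (acc, k) a = (acc, k) := by
      unfold pvStepB
      rw [if_neg]
      rintro ⟨hk, -⟩
      simp at hk
      omega
    rw [hstep]
    exact pv_skip_all s m (a + 1) b acc k hbk
termination_by (b - a).toNat
decreasing_by omega

-- the heart: A's fuelled find-and-jump loop from index i equals B's scan of the
-- remaining window range with threshold i
lemma pv_main (s m : List Char) (hm : m ≠ []) (fuel : Nat) (i : Nat) (acc : List Int)
    (hin : i ≤ s.length) (hfu : s.length - i < fuel) :
    pvLoopA s m (s.length : Int) (m.length : Int) fuel (i : Int) acc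
      = ((PySem.List.pyRange (min (i : Int) ((s.length : Int) - (m.length : Int) + 1))
            ((s.length : Int) - (m.length : Int) + 1) 1).foldl
          (pvStepB s m (m.length : Int)) (acc, (i : Int))).1 := by
  have hmlen : 0 < m.length := List.length_pos_iff.mpr hm
  induction fuel generalizing i acc with
  | zero => omega
  | succ f ih =>
    by_cases hin' : i < s.length
    · have hcond : ((i : Int) < (s.length : Int)) := by exact_mod_cast hin'
      rw [pvLoopA, if_pos hcond]
      by_cases hneg : PySem.Chars.findFrom s m (i : Int) none = -1
      · -- no occurrence of the motif at or after i: A breaks, B's scan appends nothing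
        have hno : ¬ m <:+: s.drop i :=
          (PySem.Chars.findFrom_natCast_eq_neg_one_iff s m i (le_of_lt hin')).mp hneg
        simp only [hneg, if_pos]
        by_cases hNI : (0:Int) ≤ (s.length : Int) - (m.length : Int) + 1
        · rw [pv_nomatch_seg s m (min (i : Int) ((s.length : Int) - (m.length : Int) + 1)) _
              (acc, (i : Int)) (by omega) ?_]
          intro j' hj1 hj2 hpre
          have hij' : i ≤ j'.toNat := by omega
          exact hno (pv_prefix_drop_infix hij' hpre)
        · have hmin : min (i : Int) ((s.length : Int) - (m.length : Int) + 1)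
              = (s.length : Int) - (m.length : Int) + 1 := by omega
          rw [hmin, PySem.List.pyRange_one_eq_nil le_rfl]; rfl
      · -- first occurrence at j: A appends j and jumps over it, B scans up to j,
        -- takes the window at j, and skips the overlapped windows
        obtain ⟨hij, hpre, hminimal⟩ :=
          PySem.Chars.findFrom_natCast_spec s m i (le_of_lt hin') hneg
        set j := PySem.Chars.findFrom s m (i : Int) none with hjdef
        have h0j : (0:Int) ≤ j := le_trans (Int.natCast_nonneg i) hij
        have hjcast : ((j.toNat : Nat) : Int) = j := Int.toNat_of_nonneg h0j
        have hj0n : j.toNat + m.length ≤ s.length := by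
          have := hpre.length_le; rw [List.length_drop] at this; omega
        have hjNI : j < (s.length : Int) - (m.length : Int) + 1 := by omega
        have hiNI : (i : Int) < (s.length : Int) - (m.length : Int) + 1 :=
          lt_of_le_of_lt hij hjNI
        simp only [hneg, ite_false]
        rw [min_eq_left (le_of_lt hiNI),
            PySem.List.pyRange_one_append (i : Int) j _ hij (le_of_lt hjNI),
            List.foldl_append,
            pv_nomatch_seg s m (i : Int) j (acc, (i : Int)) (Int.natCast_nonneg i)
              (by
                intro j' hj1 hj2 hp
                exact hminimal j'.toNat (by omega) (by omega) hp),
            PySem.List.pyRange_one_cons hjNI, List.foldl_cons]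
        have hstep : pvStepB s m (m.length : Int) (acc, (i : Int)) j
            = (acc ++ [j], j + (m.length : Int)) := by
          unfold pvStepB
          rw [if_pos]
          refine ⟨hij, ?_⟩
          rw [← hjcast, pv_slice_eq_iff s m j.toNat]
          exact hpre
        rw [hstep,
            PySem.List.pyRange_one_append (j + 1) (min (j + (m.length : Int)) ((s.length : Int) - (m.length : Int) + 1)) _
              (by omega) (min_le_right _ _),
            List.foldl_append,
            pv_skip_all s m (j + 1) _ (acc ++ [j]) (j + (m.length : Int)) (min_le_left _ _)]
        have H := ih (j.toNat + m.length) (acc ++ [j]) hj0n (by omega)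
        have hcast2 : ((j.toNat + m.length : Nat) : Int) = j + (m.length : Int) := by
          push_cast; omega
        rw [hcast2] at H
        exact H
    · -- loop guard false: i = length, and the window range from min is empty
      have hieq : i = s.length := by omega
      rw [pvLoopA, if_neg (by exact_mod_cast hin')]
      have hmin : min (i : Int) ((s.length : Int) - (m.length : Int) + 1)
          = (s.length : Int) - (m.length : Int) + 1 := by
        subst hieq; omega
      rw [hmin, PySem.List.pyRange_one_eq_nil le_rfl]; rfl

-- ===== VERDICT (by name: the statement is the Claim_ definition above) =====
theorem find_motif_coordates_py_spec : Claim_equal_find_motif_coordates_py := by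
  intro sequence motif _ hpre
  unfold Spec_find_motif_coordates_py find_motif_coordates_py find_motif_coordates_py_alt
  simp only [PySem.Chars.len_eq]
  have hm : motif.toList ≠ [] := by
    intro h
    exact hpre (by ext1; simp [h])
  have H := pv_main (PySem.Chars.upper sequence.toList) motif.toList hm
      ((PySem.Chars.upper sequence.toList).length + 1) 0 [] (Nat.zero_le _) (by omega)
  simp only [Nat.cast_zero] at H
  rw [H]
  by_cases hNI : (0:Int) ≤ ((PySem.Chars.upper sequence.toList).length : Int) - (motif.toList.length : Int) + 1
  · rw [min_eq_left hNI]
  · rw [min_eq_right (by omega), PySem.List.pyRange_one_eq_nil le_rfl,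
        PySem.List.pyRange_one_eq_nil (by omega)]
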